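-- pv_equiv track=rewrite | github.com/janakj/autoprov | phonebook.py | find_unassigned_base_station_prefix
-- ===== SOURCE A (Python) =====
-- def find_unassigned_base_station_prefix(leases):
--     for prefix in range(0, 10):
--         used = False
--         for mac, assigned_prefix in leases.items():
--             if assigned_prefix == str(prefix):
--                 used = True
--                 break
--         if not used:
--             return str(prefix)
--     return None
-- ===== SOURCE B (Python) =====
-- def find_unassigned_base_station_prefix(leases):
--     # Build the set of available single-digit prefixes and return its minimum.
--     avail = {str(d) for d in range(0, 10)} - set(leases.values())
--     return min(avail) if avail else None
-- ===== Notes on version B (the rewrite author's own statement) =====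
-- stated objective: simpler
-- what changed: Replaces the nested scan (for each candidate prefix rescan all leases) by one set difference of the ten candidate digits with the set of lease values, returning its minimum (min of single-character digit strings equals the original ascending numeric scan).
import Mathlib
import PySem

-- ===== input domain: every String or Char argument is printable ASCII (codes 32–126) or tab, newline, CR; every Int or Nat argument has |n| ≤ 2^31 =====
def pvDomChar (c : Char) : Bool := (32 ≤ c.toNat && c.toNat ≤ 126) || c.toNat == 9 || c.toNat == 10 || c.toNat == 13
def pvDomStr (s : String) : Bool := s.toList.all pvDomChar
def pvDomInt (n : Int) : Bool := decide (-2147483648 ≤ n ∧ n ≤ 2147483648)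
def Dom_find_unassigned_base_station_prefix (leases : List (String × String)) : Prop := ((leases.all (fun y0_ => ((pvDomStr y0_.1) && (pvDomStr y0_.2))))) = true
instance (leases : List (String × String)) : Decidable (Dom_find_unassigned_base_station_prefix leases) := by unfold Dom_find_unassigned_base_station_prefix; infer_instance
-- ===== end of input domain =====

-- B replaces A's nested scan by a set difference of the ten candidate digits
-- with the lease values, returning the minimum of the available set (simpler).

-- ===== PORT A =====
-- inner loop 'for mac, assigned_prefix in leases.items(): if … : used = True; break'
def pvUsedLoop (leases : List (String × String)) (s : String) : Bool :=
  match leases with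
  | [] => false
  | kv :: rest => if kv.2 == s then true else pvUsedLoop rest s

-- outer loop 'for prefix in range(0, 10): …'
def pvScanLoop (leases : List (String × String)) : List Int → Option String
  | [] => none                                   -- fall through: return None
  | p :: ps =>
      if pvUsedLoop leases (PySem.Int.toStr p)   -- 'used' after the inner loop
      then pvScanLoop leases ps
      else some (PySem.Int.toStr p)              -- 'if not used: return str(prefix)'

def find_unassigned_base_station_prefix (leases : List (String × String)) : Option String :=
  pvScanLoop leases (PySem.List.pyRange 0 10 1)

-- ===== PORT B =====
def find_unassigned_base_station_prefix_alt (leases : List (String × String)) : Option String :=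
  -- avail = {str(d) for d in range(0, 10)} - set(leases.values())
  let avail : PySem.Set String :=
    PySem.Set.diff (PySem.Set.ofList ((PySem.List.pyRange 0 10 1).map (fun d => PySem.Int.toStr d)))
      (leases.map (fun kv => kv.2))
  -- 'min(avail) if avail else None': min? is some of the minimum, none exactly on the empty list
  PySem.List.min? avail (fun x => x)

-- ===== PRECONDITION & SPEC =====
def Spec_find_unassigned_base_station_prefix (leases : List (String × String)) (out : Option String) : Prop := out = find_unassigned_base_station_prefix_alt leases
instance (leases : List (String × String)) (out : Option String) : Decidable (Spec_find_unassigned_base_station_prefix leases out) := by unfold Spec_find_unassigned_base_station_prefix; infer_instance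

-- ===== CLAIM (what is proved, stated in full; the proofs are below) =====
def Claim_equal_find_unassigned_base_station_prefix : Prop := ∀ (leases : List (String × String)), Dom_find_unassigned_base_station_prefix leases → Spec_find_unassigned_base_station_prefix leases (find_unassigned_base_station_prefix leases)

-- ===== LEMMAS AND PROOFS =====

lemma pvUsedLoop_eq_contains (leases : List (String × String)) (s : String) :
    pvUsedLoop leases s = (leases.map (fun kv => kv.2)).contains s := by
  induction leases with
  | nil => rfl
  | cons kv rest ih =>
      simp only [pvUsedLoop, List.map_cons, List.contains_cons]
      cases h : kv.2 == s with
      | true => simp [(eq_of_beq h).symm]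
      | false =>
          have hne : kv.2 ≠ s := by simpa using h
          have hs : (s == kv.2) = false := by
            cases hb : s == kv.2
            · rfl
            · exact absurd (eq_of_beq hb).symm hne
          simp [hs, ih]

lemma pvScanLoop_eq_find? (leases : List (String × String)) (ps : List Int) :
    pvScanLoop leases ps = (ps.map PySem.Int.toStr).find? (fun s => !pvUsedLoop leases s) := by
  induction ps with
  | nil => rfl
  | cons p ps ih =>
      simp only [pvScanLoop, List.map_cons, List.find?_cons]
      by_cases h : pvUsedLoop leases (PySem.Int.toStr p)
      · simp [h, ih]
      · simp [h]

lemma foldl_min_of_le (a : String) (xs : List String) (h : ∀ x ∈ xs, a ≤ x) :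
    xs.foldl min a = a := by
  induction xs with
  | nil => rfl
  | cons x xs ih =>
      have hax : min a x = a := min_eq_left (h x (by simp))
      simp only [List.foldl_cons, hax]
      exact ih (fun y hy => h y (by simp [hy]))

-- min over the surviving elements of a strictly increasing list is its first survivor
lemma min?_filter_sorted (L : List String) (q : String → Bool) (h : L.Pairwise (· < ·)) :
    PySem.List.min? (L.filter q) (fun x => x) = L.find? q := by
  induction L with
  | nil => rfl
  | cons a t ih =>
      have ha : ∀ x ∈ t, a < x := (List.pairwise_cons.mp h).1
      have ht := (List.pairwise_cons.mp h).2
      by_cases hq : q a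
      · rw [List.filter_cons_of_pos hq, List.find?_cons_of_pos hq, PySem.List.min?_id_cons]
        have : (t.filter q).foldl min a = a :=
          foldl_min_of_le a _ (fun x hx => le_of_lt (ha x (List.mem_of_mem_filter hx)))
        rw [this]
      · rw [List.filter_cons_of_neg (by simp [hq]), List.find?_cons_of_neg (by simp [hq]), ih ht]

theorem pv_main (leases : List (String × String)) :
    find_unassigned_base_station_prefix leases = find_unassigned_base_station_prefix_alt leases := by
  have hC : (PySem.List.pyRange 0 10 1).map PySem.Int.toStr
      = ["0","1","2","3","4","5","6","7","8","9"] := by decide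
  have hOf : PySem.Set.ofList (["0","1","2","3","4","5","6","7","8","9"] : List String)
      = ["0","1","2","3","4","5","6","7","8","9"] := by decide
  have hPair' : (["0","1","2","3","4","5","6","7","8","9"] : List String).Pairwise
      (fun a b => a.toList < b.toList) := by decide
  have hPair : (["0","1","2","3","4","5","6","7","8","9"] : List String).Pairwise (· < ·) :=
    hPair'.imp (fun h => String.lt_iff_toList_lt.mpr h)
  have hdiff : ∀ (s t : List String), PySem.Set.diff s t = s.filter (fun x => !(t.contains x)) :=
    fun _ _ => rfl
  unfold find_unassigned_base_station_prefix find_unassigned_base_station_prefix_alt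
  rw [pvScanLoop_eq_find?]
  simp only [hC, hOf, hdiff, min?_filter_sorted _ _ hPair, pvUsedLoop_eq_contains]

-- ===== VERDICT (by name: the statement is the Claim_ definition above) =====
theorem find_unassigned_base_station_prefix_spec : Claim_equal_find_unassigned_base_station_prefix := by
  intro leases _
  exact pv_main leases
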